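-- pv_equiv track=rewrite | github.com/mark-mo/saiqa | saiqa/importData.py | octalConv
-- ===== SOURCE A (Python) =====
-- def octalConv(x):
--     ans = []
--     for line in x:
--         number = ord(line)
--         convNum = oct(number)
--         convNum = int(convNum[2:])
--
--         ans.append(convNum)
--     return ans
-- ===== SOURCE B (Python) =====
-- def octalConv(x):
--     return [_octVal(ord(c)) for c in x]
--
-- def _octVal(n):
--     # decimal-encoded octal via divmod-by-8 digit extraction
--     result = 0
--     place = 1
--     while n > 0:
--         result += (n % 8) * place
--         place *= 10
--         n //= 8
--     return result
-- ===== Notes on version B (the rewrite author's own statement) =====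
-- stated objective: alternative
-- what changed: Replaces oct()/string-slicing/int() round-trip with direct arithmetic digit extraction (divmod-by-8 loop accumulating decimal place values) inside a list comprehension.
import Mathlib
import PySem

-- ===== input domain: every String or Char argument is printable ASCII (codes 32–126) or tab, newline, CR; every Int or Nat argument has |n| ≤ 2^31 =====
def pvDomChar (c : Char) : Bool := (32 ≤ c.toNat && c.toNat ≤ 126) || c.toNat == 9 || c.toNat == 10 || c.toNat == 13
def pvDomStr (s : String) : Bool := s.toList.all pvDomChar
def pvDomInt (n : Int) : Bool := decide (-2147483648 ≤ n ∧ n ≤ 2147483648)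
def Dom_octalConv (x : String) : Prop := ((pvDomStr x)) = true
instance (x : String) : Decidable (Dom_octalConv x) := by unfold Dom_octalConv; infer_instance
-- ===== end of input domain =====

-- B replaces the oct()/slice/int() round-trip by arithmetic octal-digit extraction (alternative decomposition, same cost).

-- ===== PORT A =====
-- hand port of oct(n) for n ≥ 0: digit characters of n in base 8, most significant first
-- fuel = totality guard only; n/8 < n so fuel n suffices
def octChars : Nat → Nat → List Char
  | 0, _ => []
  | fuel + 1, n => if n = 0 then [] else octChars fuel (n / 8) ++ [Char.ofNat (48 + n % 8)]

-- oct(n) for n ≥ 0 (A only ever applies it to ord(c) ≥ 0); exact there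
def pyOct (n : Int) : String :=
  "0o" ++ String.ofList (if n.toNat = 0 then ['0'] else octChars n.toNat n.toNat)

def octalConv (x : String) : List Int :=
  x.toList.foldl (fun ans line =>
    let number : Int := (line.toNat : Int)
    let convNum : String := pyOct number
    -- int(convNum[2:]): never raises here (nonempty digit string), so getD 0 is exact
    let convNum2 : Int := (PySem.Int.ofStr? (String.ofList (PySem.List.slice convNum.toList (some 2) none))).getD 0
    ans ++ [convNum2]) []

-- ===== PORT B =====
-- fuel = totality guard only; 0 < n//8 ≤ n/8 shrinks, so fuel n.toNat+1 suffices
def octVal : Nat → Int → Int → Int → Int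
  | 0, _, result, _ => result
  | fuel + 1, n, result, place =>
    if n ≤ 0 then result
    else octVal fuel (PySem.Int.floordiv n 8) (result + PySem.Int.mod n 8 * place) (place * 10)

def octalConv_alt (x : String) : List Int :=
  x.toList.map (fun c => octVal (c.toNat + 1) (c.toNat : Int) 0 1)

-- ===== PRECONDITION & SPEC =====
def Spec_octalConv (x : String) (out : List Int) : Prop := out = octalConv_alt x
instance (x : String) (out : List Int) : Decidable (Spec_octalConv x out) := by unfold Spec_octalConv; infer_instance

-- ===== CLAIM (what is proved, stated in full; the proofs are below) =====
def Claim_equal_octalConv : Prop := ∀ (x : String), Dom_octalConv x → Spec_octalConv x (octalConv x)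

-- ===== LEMMAS AND PROOFS =====
theorem foldl_append_map {α β : Type} (f : α → β) :
    ∀ (l : List α) (acc : List β),
      l.foldl (fun ans c => ans ++ [f c]) acc = acc ++ l.map f := by
  intro l
  induction l with
  | nil => simp
  | cons c t ih => intro acc; simp [ih]

set_option maxRecDepth 4000 in
theorem key_lt_128 : ∀ n : Nat, n < 128 →
    (PySem.Int.ofStr? (String.ofList (PySem.List.slice (pyOct (n : Int)).toList (some 2) none))).getD 0
      = octVal (n + 1) (n : Int) 0 1 := by decide

-- ===== VERDICT (by name: the statement is the Claim_ definition above) =====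
theorem octalConv_spec : Claim_equal_octalConv := by
  intro x hdom
  unfold Spec_octalConv octalConv octalConv_alt
  rw [foldl_append_map]
  simp only [List.nil_append]
  apply List.map_congr_left
  intro c hc
  have hdc : pvDomChar c = true := by
    have := (List.all_eq_true.mp hdom) c hc
    exact this
  have hlt : c.toNat < 128 := by
    simp [pvDomChar] at hdc
    omega
  exact key_lt_128 c.toNat hlt
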